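-- pv_equiv track=rewrite | github.com/funcgen/herv-rna-regulation | scripts/03_integrated_annotation/02_bed_to_gtf.py | infer_family_from_classfamily
-- ===== SOURCE A (Python) =====
-- from typing import Dict, List, Optional, Tuple
--
-- def infer_family_from_classfamily(cf: str) -> Optional[str]:
--     if not cf: return None
--     toks = [t.strip() for t in cf.split("/")]
--     for t in toks:
--         if t.startswith("ERV"): return t
--     for t in toks:
--         if "ERV" in t: return t
--     return None
-- ===== SOURCE B (Python) =====
-- def infer_family_from_classfamily(cf):
--     if not cf:
--         return None
--     fallback = None
--     for raw in cf.split("/"):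
--         t = raw.strip()
--         if t.startswith("ERV"):
--             return t
--         if fallback is None and "ERV" in t:
--             fallback = t
--     return fallback
-- ===== Notes on version B (the rewrite author's own statement) =====
-- stated objective: simpler
-- what changed: Replaced A's build-a-stripped-token-list plus two separate sequential scans (startswith pass, then contains pass) with a single pass that strips each token as it goes, returns a startswith-match immediately and remembers the first merely-containing token as a fallback returned after the loop.
import Mathlib
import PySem

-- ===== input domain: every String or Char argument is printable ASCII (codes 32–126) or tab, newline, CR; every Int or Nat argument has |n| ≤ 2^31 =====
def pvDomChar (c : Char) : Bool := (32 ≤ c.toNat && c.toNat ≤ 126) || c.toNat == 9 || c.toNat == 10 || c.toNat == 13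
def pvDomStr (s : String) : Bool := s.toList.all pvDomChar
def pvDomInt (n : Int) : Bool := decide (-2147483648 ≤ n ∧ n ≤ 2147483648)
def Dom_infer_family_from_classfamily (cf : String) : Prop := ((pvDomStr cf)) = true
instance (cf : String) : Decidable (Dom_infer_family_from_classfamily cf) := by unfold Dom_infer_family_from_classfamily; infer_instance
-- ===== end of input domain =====

-- B fuses A's two separate scans (startswith pass, then contains pass) into one pass over the
-- tokens with a remembered first 'contains' fallback; objective: simpler (one loop instead of two).


-- ===== PORT A =====
-- first for-loop: return the first token starting with "ERV"
def aLoop1 : List String → Option String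
  | [] => none
  | t :: rest => if PySem.Str.startswith t "ERV" then some t else aLoop1 rest

-- second for-loop: return the first token containing "ERV"
def aLoop2 : List String → Option String
  | [] => none
  | t :: rest => if PySem.Str.isIn "ERV" t then some t else aLoop2 rest

def infer_family_from_classfamily (cf : String) : Option String :=
  if cf = "" then none
  else
    let toks := ((PySem.Str.split? cf "/").getD []).map (fun t => PySem.Str.strip t)
    match aLoop1 toks with
    | some t => some t
    | none => aLoop2 toks

-- ===== PORT B =====
-- single pass: strip each raw token, return a startswith-match at once,
-- remember the first merely-containing token as fallback, return it after the loop
def bLoop : List String → Option String → Option String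
  | [], fallback => fallback
  | raw :: rest, fallback =>
    let t := PySem.Str.strip raw
    if PySem.Str.startswith t "ERV" then some t
    else if fallback = none ∧ PySem.Str.isIn "ERV" t then bLoop rest (some t)
    else bLoop rest fallback

def infer_family_from_classfamily_alt (cf : String) : Option String :=
  if cf = "" then none
  else bLoop ((PySem.Str.split? cf "/").getD []) none

-- ===== PRECONDITION & SPEC =====
def Spec_infer_family_from_classfamily (cf : String) (out : Option String) : Prop := out = infer_family_from_classfamily_alt cf
instance (cf : String) (out : Option String) : Decidable (Spec_infer_family_from_classfamily cf out) := by unfold Spec_infer_family_from_classfamily; infer_instance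

-- ===== CLAIM (what is proved, stated in full; the proofs are below) =====
def Claim_equal_infer_family_from_classfamily : Prop := ∀ (cf : String), Dom_infer_family_from_classfamily cf → Spec_infer_family_from_classfamily cf (infer_family_from_classfamily cf)

-- ===== LEMMAS AND PROOFS =====

-- bLoop's invariant: an eventual startswith-match wins, else the first recorded fallback, else the first contains-match
theorem bLoop_eq (raws : List String) (fb : Option String) :
    bLoop raws fb =
      match aLoop1 (raws.map (fun t => PySem.Str.strip t)) with
      | some t => some t
      | none =>
        match fb with
        | some u => some u
        | none => aLoop2 (raws.map (fun t => PySem.Str.strip t)) := by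
  induction raws generalizing fb with
  | nil => cases fb <;> simp [bLoop, aLoop1, aLoop2]
  | cons raw rest ih =>
    simp only [bLoop, List.map_cons, aLoop1, aLoop2]
    by_cases hs : PySem.Str.startswith (PySem.Str.strip raw) "ERV" = true
    · simp only [if_pos hs]
    · simp only [if_neg hs]
      cases fb with
      | some u =>
        rw [if_neg (by simp), ih]
      | none =>
        by_cases hc : PySem.Chars.isIn ['E','R','V'] (PySem.Chars.strip raw.toList) = true
        · rw [if_pos ⟨rfl, by simpa using hc⟩, ih]
          cases aLoop1 (rest.map fun t => PySem.Str.strip t) <;> simp [hc]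
        · rw [if_neg (by simpa using hc), ih]
          cases aLoop1 (rest.map fun t => PySem.Str.strip t) <;> simp [hc]

-- ===== VERDICT (by name: the statement is the Claim_ definition above) =====
theorem infer_family_from_classfamily_spec : Claim_equal_infer_family_from_classfamily := by
  intro cf _
  unfold Spec_infer_family_from_classfamily infer_family_from_classfamily infer_family_from_classfamily_alt
  by_cases h : cf = ""
  · simp [h]
  · simp only [h, if_false, bLoop_eq]
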